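-- pv_equiv track=rewrite | github.com/AugustBugge/canonicalSystems | canonical_rule2_percentages.py | dp_min_coins_up_to
-- ===== SOURCE A (Python) =====
-- from typing import List, Optional
--
-- INF = 10**9
--
-- def dp_min_coins_up_to(max_amount: int, coins_asc: List[int]) -> List[int]:
--     """Unbounded coin-change DP for minimum coins up to max_amount."""
--     dp = [INF] * (max_amount + 1)
--     dp[0] = 0
--     for x in range(1, max_amount + 1):
--         best = dp[x]
--         for c in coins_asc:
--             if c <= x:
--                 cand = dp[x - c] + 1
--                 if cand < best:
--                     best = cand
--         dp[x] = best
--     return dp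
-- ===== SOURCE B (Python) =====
-- INF = 10**9
--
-- def dp_min_coins_up_to(max_amount, coins_asc):
--     """Unit-weight BFS over amounts: level-synchronous frontier expansion."""
--     dist = [INF] * (max_amount + 1)
--     dist[0] = 0
--     frontier = [0]
--     for level in range(1, max_amount + 1):
--         nxt = []
--         for x in frontier:
--             for c in coins_asc:
--                 y = x + c
--                 if y <= max_amount and level < dist[y]:
--                     dist[y] = level
--                     nxt.append(y)
--         frontier = nxt
--     return dist
-- ===== Notes on version B (the rewrite author's own statement) =====
-- stated objective: alternative
-- what changed: Replaced the tabular DP relaxation by a breadth-first search on the amount graph (edges x -> x+c of weight 1): a level-synchronous frontier expansion that sets dist[y] to the BFS level when y is first reached, instead of computing each table cell from its predecessors.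
import Mathlib
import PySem

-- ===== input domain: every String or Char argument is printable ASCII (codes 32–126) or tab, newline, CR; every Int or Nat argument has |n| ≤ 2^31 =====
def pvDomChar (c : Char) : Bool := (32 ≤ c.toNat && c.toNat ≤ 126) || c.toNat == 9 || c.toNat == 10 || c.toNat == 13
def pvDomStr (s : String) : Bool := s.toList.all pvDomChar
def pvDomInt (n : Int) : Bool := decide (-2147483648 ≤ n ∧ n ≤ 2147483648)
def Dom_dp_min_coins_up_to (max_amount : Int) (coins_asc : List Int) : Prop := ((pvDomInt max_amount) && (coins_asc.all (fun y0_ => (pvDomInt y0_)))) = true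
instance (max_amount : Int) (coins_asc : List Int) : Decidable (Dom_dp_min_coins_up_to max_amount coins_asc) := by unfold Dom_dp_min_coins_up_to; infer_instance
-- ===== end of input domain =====

-- B replaces A's tabular DP relaxation by a breadth-first search on the amount
-- graph (edges x -> x+c, weight 1): a level-synchronous frontier expansion that
-- sets dist[y] to the BFS level when y is first reached; same values, proved.

def pyINF : Int := 1000000000

-- ===== PORT A =====
def dp_min_coins_up_to (max_amount : Int) (coins_asc : List Int) : List Int :=
  let dp0 := PySem.List.pySetD (List.replicate (max_amount + 1).toNat pyINF) 0 0
  (PySem.List.pyRange 1 (max_amount + 1) 1).foldl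
    (fun dp x =>
      let best := coins_asc.foldl
        (fun best c =>
          if c ≤ x then
            let cand := PySem.List.pyGetD dp (x - c) 0 + 1
            if cand < best then cand else best
          else best)
        (PySem.List.pyGetD dp x 0)
      PySem.List.pySetD dp x best)
    dp0

-- ===== PORT B =====
-- one BFS level: expand every frontier node x along every coin c; first reach wins
def bfsLevel (max_amount : Int) (coins_asc : List Int)
    (st : List Int × List Int) (level : Int) : List Int × List Int :=
  st.2.foldl
    (fun p x =>
      coins_asc.foldl
        (fun q c =>
          let y := x + c
          if y ≤ max_amount ∧ level < PySem.List.pyGetD q.1 y 0 then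
            (PySem.List.pySetD q.1 y level, q.2 ++ [y])
          else q)
        p)
    (st.1, [])

def dp_min_coins_up_to_alt (max_amount : Int) (coins_asc : List Int) : List Int :=
  let dist0 := PySem.List.pySetD (List.replicate (max_amount + 1).toNat pyINF) 0 0
  ((PySem.List.pyRange 1 (max_amount + 1) 1).foldl
      (bfsLevel max_amount coins_asc) (dist0, [0])).1

-- ===== PRECONDITION & SPEC =====
-- Pre_ is exactly A's non-raising set: A raises IndexError for negative
-- max_amount (on dp[0] = 0) and, when max_amount ≥ 1, for any negative coin
-- (dp[x - c] overflows the table at x = max_amount).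
def Pre_dp_min_coins_up_to (max_amount : Int) (coins_asc : List Int) : Prop :=
  0 ≤ max_amount ∧ (max_amount = 0 ∨ ∀ c ∈ coins_asc, 0 ≤ c)
instance (max_amount : Int) (coins_asc : List Int) : Decidable (Pre_dp_min_coins_up_to max_amount coins_asc) := by
  unfold Pre_dp_min_coins_up_to; infer_instance

def pvWitness_dp_min_coins_up_to : Int × List Int := (3, [1, 2])

def Spec_dp_min_coins_up_to (max_amount : Int) (coins_asc : List Int) (out : List Int) : Prop := out = dp_min_coins_up_to_alt max_amount coins_asc
instance (max_amount : Int) (coins_asc : List Int) (out : List Int) : Decidable (Spec_dp_min_coins_up_to max_amount coins_asc out) := by unfold Spec_dp_min_coins_up_to; infer_instance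

-- ===== CLAIM (what is proved, stated in full; the proofs are below) =====
def Claim_equal_dp_min_coins_up_to : Prop := ∀ (max_amount : Int) (coins_asc : List Int), Dom_dp_min_coins_up_to max_amount coins_asc → Pre_dp_min_coins_up_to max_amount coins_asc → Spec_dp_min_coins_up_to max_amount coins_asc (dp_min_coins_up_to max_amount coins_asc)

-- ===== LEMMAS AND PROOFS =====

-- the exact minimum-coin value table, defined by A's recurrence
def tstep (coins : List Int) (t : List Int) (x : Nat) : Int :=
  coins.foldl (fun b c => if 0 < c ∧ c ≤ (x : Int) then min b (t.getD (x - c.toNat) pyINF + 1) else b) pyINF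

def tbl (coins : List Int) : Nat → List Int
  | 0 => [0]
  | n+1 => tbl coins n ++ [tstep coins (tbl coins n) (n+1)]

def V (coins : List Int) (x : Nat) : Int := (tbl coins x).getD x pyINF

theorem foldl_minif_le_init {α : Type} (l : List α) (P : α → Prop) [DecidablePred P]
    (e : α → Int) (b0 : Int) :
    l.foldl (fun b c => if P c then min b (e c) else b) b0 ≤ b0 := by
  induction l generalizing b0 with
  | nil => simp
  | cons c t ih =>
    simp only [List.foldl_cons]
    split
    · exact le_trans (ih _) (min_le_left _ _)
    · exact ih _

theorem length_tbl (coins : List Int) (n : Nat) : (tbl coins n).length = n + 1 := by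
  induction n with
  | zero => rfl
  | succ n ih => simp [tbl, ih]

theorem tbl_getD (coins : List Int) {n i : Nat} (h : i ≤ n) :
    (tbl coins n).getD i pyINF = V coins i := by
  induction n with
  | zero => interval_cases i; rfl
  | succ n ih =>
    rcases Nat.lt_or_ge i (n+1) with hlt | hge
    · rw [tbl, List.getD_append _ _ _ _ (by rw [length_tbl]; omega)]
      exact ih (by omega)
    · have : i = n + 1 := by omega
      subst this
      rfl

theorem V_succ (coins : List Int) (n : Nat) :
    V coins (n+1) = coins.foldl
      (fun b c => if 0 < c ∧ c ≤ ((n:Int) + 1) then min b (V coins (n + 1 - c.toNat) + 1) else b)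
      pyINF := by
  have h1 : V coins (n+1) = tstep coins (tbl coins n) (n+1) := by
    have ht : tbl coins (n+1) = tbl coins n ++ [tstep coins (tbl coins n) (n+1)] := rfl
    rw [V, ht, List.getD_append_right]
    · simp [length_tbl]
    · rw [length_tbl]
  rw [h1]
  unfold tstep
  apply PySem.List.foldl_congr_mem
  intro acc c hcmem
  by_cases hg : 0 < c ∧ c ≤ ((n:Nat)+1 : Int)
  · rw [if_pos (by exact_mod_cast hg), if_pos (by exact_mod_cast hg)]
    rw [tbl_getD coins (by omega)]
  · rw [if_neg (by exact_mod_cast hg), if_neg (by exact_mod_cast hg)]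

theorem V_zero (coins : List Int) : V coins 0 = 0 := rfl

theorem foldl_minif_le_elem {α : Type} (l : List α) (P : α → Prop) [DecidablePred P]
    (e : α → Int) (b0 : Int) {c : α} (hc : c ∈ l) (hP : P c) :
    l.foldl (fun b c => if P c then min b (e c) else b) b0 ≤ e c := by
  induction l generalizing b0 with
  | nil => cases hc
  | cons a t ih =>
    simp only [List.foldl_cons]
    rcases List.mem_cons.1 hc with rfl | hmem
    · rw [if_pos hP]
      exact le_trans (foldl_minif_le_init t P e _) (min_le_right _ _)
    · split <;> exact ih _ hmem

theorem foldl_minif_attains {α : Type} (l : List α) (P : α → Prop) [DecidablePred P]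
    (e : α → Int) (b0 : Int) :
    l.foldl (fun b c => if P c then min b (e c) else b) b0 = b0 ∨
      ∃ c ∈ l, P c ∧ l.foldl (fun b c => if P c then min b (e c) else b) b0 = e c := by
  induction l generalizing b0 with
  | nil => left; rfl
  | cons a t ih =>
    simp only [List.foldl_cons]
    by_cases hP : P a
    · rw [if_pos hP]
      rcases ih (min b0 (e a)) with h | ⟨c, hmem, hPc, h⟩
      · rcases min_cases b0 (e a) with ⟨hmin, _⟩ | ⟨hmin, _⟩
        · left; rw [h, hmin]
        · right; exact ⟨a, List.mem_cons_self, hP, by rw [h, hmin]⟩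
      · right; exact ⟨c, List.mem_cons_of_mem _ hmem, hPc, h⟩
    · rw [if_neg hP]
      rcases ih b0 with h | ⟨c, hmem, hPc, h⟩
      · left; exact h
      · right; exact ⟨c, List.mem_cons_of_mem _ hmem, hPc, h⟩

theorem set_map_range {f : Nat → Int} {n k : Nat} (_hk : k < n) (v : Int) :
    ((List.range n).map f).set k v = (List.range n).map (fun i => if i = k then v else f i) := by
  apply List.ext_getElem
  · simp
  · intro i h1 h2
    simp only [List.length_set, List.length_map, List.length_range] at h1
    rw [List.getElem_set]
    simp only [List.getElem_map, List.getElem_range]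
    by_cases hik : k = i
    · simp [hik]
    · rw [if_neg hik, if_neg (fun h => hik h.symm)]

def arow (coins : List Int) (m k : Nat) : List Int :=
  (List.range (m+1)).map (fun i => if i ≤ k then V coins i else pyINF)

theorem dp0_eq_arow (coins : List Int) (m : Nat) :
    (List.replicate (m+1) pyINF).set 0 0 = arow coins m 0 := by
  apply List.ext_getElem
  · simp [arow]
  · intro i h1 h2
    simp only [List.length_set, List.length_replicate] at h1
    rw [List.getElem_set]
    simp only [arow, List.getElem_map, List.getElem_range]
    by_cases hi : 0 = i
    · subst hi; simp [V_zero]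
    · rw [if_neg hi, List.getElem_replicate, if_neg (by omega)]

theorem arow_last (coins : List Int) (m : Nat) :
    arow coins m m = (List.range (m+1)).map (fun i => V coins i) := by
  apply List.map_congr_left
  intro i hi
  rw [List.mem_range] at hi
  rw [if_pos (by omega)]

theorem portA_inner (coins : List Int) (l : List Int) (hc : ∀ c ∈ l, 0 ≤ c)
    (dp : List Int) (k : Nat)
    (hr : ∀ c : Int, 0 < c → c ≤ ((k+1 : Nat) : Int) →
      PySem.List.pyGetD dp ((((k+1 : Nat) : Int)) - c) 0 = V coins (k + 1 - c.toNat))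
    (hr0 : PySem.List.pyGetD dp (((k+1 : Nat) : Int)) 0 = pyINF)
    (b : Int) (hb : b ≤ pyINF) :
    l.foldl
      (fun best c =>
        if c ≤ (((k+1 : Nat) : Int)) then
          (if PySem.List.pyGetD dp ((((k+1 : Nat) : Int)) - c) 0 + 1 < best then
            PySem.List.pyGetD dp ((((k+1 : Nat) : Int)) - c) 0 + 1
          else best)
        else best) b
      =
    l.foldl
      (fun b c => if 0 < c ∧ c ≤ ((k:Int) + 1) then min b (V coins (k + 1 - c.toNat) + 1) else b) b := by
  induction l generalizing b with
  | nil => rfl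
  | cons c t ih =>
    have hc0 : 0 ≤ c := hc c List.mem_cons_self
    have hct : ∀ c' ∈ t, 0 ≤ c' := fun c' h => hc c' (List.mem_cons_of_mem _ h)
    simp only [List.foldl_cons]
    by_cases hcx : c ≤ (((k+1 : Nat) : Int))
    · by_cases hpos : 0 < c
      · rw [if_pos hcx, hr c hpos hcx]
        have hg : (0 < c ∧ c ≤ ((k:Int) + 1)) := ⟨hpos, by push_cast at hcx ⊢; omega⟩
        rw [if_pos hg]
        have hmin : (if V coins (k + 1 - c.toNat) + 1 < b then V coins (k + 1 - c.toNat) + 1 else b)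
            = min b (V coins (k + 1 - c.toNat) + 1) := by
          rcases lt_or_ge (V coins (k + 1 - c.toNat) + 1) b with h | h
          · rw [if_pos h, min_eq_right (le_of_lt h)]
          · rw [if_neg (by omega), min_eq_left h]
        rw [hmin]
        exact ih hct _ (le_trans (min_le_left _ _) hb)
      · have hzero : c = 0 := by omega
        subst hzero
        rw [if_pos hcx, sub_zero, hr0, if_neg (by omega), if_neg (by simp)]
        exact ih hct b hb
    · rw [if_neg hcx, if_neg (by push_cast at hcx ⊢; omega)]
      exact ih hct b hb

theorem arow_read_pos (coins : List Int) (M k : Nat) (hk : k + 1 ≤ M)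
    {c : Int} (hpos : 0 < c) (hcx : c ≤ ((k+1 : Nat) : Int)) :
    PySem.List.pyGetD (arow coins M k) (((k+1 : Nat) : Int) - c) 0 = V coins (k + 1 - c.toNat) := by
  have hidx : ((k+1 : Nat) : Int) - c = ((k + 1 - c.toNat : Nat) : Int) := by
    have := Int.toNat_of_nonneg hpos.le
    push_cast at hcx ⊢
    omega
  rw [hidx, PySem.List.pyGetD_natCast, arow, PySem.List.getD_map_range _ _ _ _ (by omega),
    if_pos (by have := Int.toNat_of_nonneg hpos.le; push_cast at hcx; omega)]

theorem arow_read_top (coins : List Int) (M k : Nat) (hk : k + 1 ≤ M) :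
    PySem.List.pyGetD (arow coins M k) ((k+1 : Nat) : Int) 0 = pyINF := by
  rw [PySem.List.pyGetD_natCast, arow, PySem.List.getD_map_range _ _ _ _ (by omega),
    if_neg (by omega)]

theorem portA_loop (coins : List Int) (hc : ∀ c ∈ coins, 0 ≤ c) (M : Nat) :
    ∀ k : Nat, k ≤ M →
    (PySem.List.pyRange 1 ((k:Int) + 1) 1).foldl
      (fun dp x =>
        let best := coins.foldl
          (fun best c =>
            if c ≤ x then
              let cand := PySem.List.pyGetD dp (x - c) 0 + 1
              if cand < best then cand else best
            else best)
          (PySem.List.pyGetD dp x 0)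
        PySem.List.pySetD dp x best)
      (arow coins M 0) = arow coins M k := by
  intro k
  induction k with
  | zero => intro _; rw [PySem.List.pyRange_one_eq_nil (by norm_num)]; rfl
  | succ k ih =>
    intro hk1
    have hcast : ((k+1 : Nat) : Int) + 1 = ((k:Int) + 1) + 1 := by push_cast; ring
    rw [hcast, PySem.List.pyRange_one_succ_right (by omega), List.foldl_append, ih (by omega),
      List.foldl_cons, List.foldl_nil]
    have hx : ((k:Int) + 1) = ((k+1 : Nat) : Int) := by push_cast; ring
    simp only [hx]
    rw [arow_read_top coins M k hk1]
    rw [portA_inner coins coins hc (arow coins M k) k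
      (fun c hpos hcx => arow_read_pos coins M k hk1 hpos hcx)
      (arow_read_top coins M k hk1) pyINF le_rfl]
    rw [← V_succ]
    rw [PySem.List.pySetD_natCast, arow, set_map_range (by omega)]
    apply List.map_congr_left
    intro i hi
    rw [List.mem_range] at hi
    by_cases hik : i = k + 1
    · subst hik; rw [if_pos rfl, if_pos (by omega)]
    · rw [if_neg hik]
      by_cases hik2 : i ≤ k
      · rw [if_pos hik2, if_pos (by omega)]
      · rw [if_neg hik2, if_neg (by omega)]

theorem portA_eq (max_amount : Int) (coins_asc : List Int)
    (hm : 0 ≤ max_amount) (hc : ∀ c ∈ coins_asc, 0 ≤ c) :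
    dp_min_coins_up_to max_amount coins_asc =
      (List.range (max_amount.toNat + 1)).map (fun i => V coins_asc i) := by
  obtain ⟨M, hM⟩ : ∃ M : Nat, max_amount = (M:Int) := ⟨max_amount.toNat, (Int.toNat_of_nonneg hm).symm⟩
  subst hM
  rw [Int.toNat_natCast]
  unfold dp_min_coins_up_to
  have h1 : ((M:Int) + 1).toNat = M + 1 := by omega
  have h2 : PySem.List.pySetD (List.replicate (M+1) pyINF) 0 0
      = arow coins_asc M 0 := by
    rw [PySem.List.pySetD_of_nonneg _ _ le_rfl, Int.toNat_zero, dp0_eq_arow]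
  rw [h1, h2]
  rw [portA_loop coins_asc hc M M le_rfl, arow_last]

-- ---- basic facts about the value table V ----

theorem V_nonneg (coins : List Int) (n : Nat) : 0 ≤ V coins n := by
  induction n using Nat.strong_induction_on with
  | _ n ih =>
    match n with
    | 0 => rw [V_zero]
    | m+1 =>
      rcases foldl_minif_attains coins (fun c => 0 < c ∧ c ≤ ((m:Int) + 1))
          (fun c => V coins (m + 1 - c.toNat) + 1) pyINF with h | ⟨c, _, hg, h⟩
      · rw [V_succ, h]; norm_num [pyINF]
      · rw [V_succ, h]
        have := ih (m + 1 - c.toNat) (by have := Int.toNat_of_nonneg hg.1.le; omega)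
        omega

theorem V_ge_one (coins : List Int) (n : Nat) : 1 ≤ V coins (n+1) := by
  rcases foldl_minif_attains coins (fun c => 0 < c ∧ c ≤ ((n:Int) + 1))
      (fun c => V coins (n + 1 - c.toNat) + 1) pyINF with h | ⟨c, _, _, h⟩
  · rw [V_succ, h]; norm_num [pyINF]
  · rw [V_succ, h]
    have := V_nonneg coins (n + 1 - c.toNat)
    omega

theorem V_le_INF (coins : List Int) (n : Nat) : V coins n ≤ pyINF := by
  match n with
  | 0 => rw [V_zero]; norm_num [pyINF]
  | m+1 => rw [V_succ]; exact foldl_minif_le_init _ _ _ _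

theorem V_le_self (coins : List Int) (n : Nat) (h : V coins n < pyINF) : V coins n ≤ (n:Int) := by
  induction n using Nat.strong_induction_on with
  | _ n ih =>
    match n with
    | 0 => rw [V_zero]; simp
    | m+1 =>
      rcases foldl_minif_attains coins (fun c => 0 < c ∧ c ≤ ((m:Int) + 1))
          (fun c => V coins (m + 1 - c.toNat) + 1) pyINF with hh | ⟨c, _, hg, hh⟩
      · rw [V_succ] at h; rw [hh] at h; omega
      · rw [V_succ] at h ⊢
        rw [hh] at h ⊢
        have hlt : m + 1 - c.toNat < m + 1 := by
          have := Int.toNat_of_nonneg hg.1.le; omega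
        have hVm : V coins (m + 1 - c.toNat) < pyINF := by omega
        have := ih _ hlt hVm
        have hc1 : 1 ≤ c.toNat := by have := Int.toNat_of_nonneg hg.1.le; omega
        have : ((m + 1 - c.toNat : Nat) : Int) ≤ (m : Int) := by push_cast; omega
        push_cast at *
        omega

theorem V_triangle (coins : List Int) {c : Int} (hmem : c ∈ coins) (hc : 0 < c)
    {n : Nat} (hle : c ≤ (n:Int)) : V coins n ≤ V coins (n - c.toNat) + 1 := by
  have h1 : 1 ≤ n := by have := Int.toNat_of_nonneg hc.le; omega
  obtain ⟨m, rfl⟩ : ∃ m, n = m + 1 := ⟨n - 1, by omega⟩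
  rw [V_succ]
  exact foldl_minif_le_elem coins (fun c => 0 < c ∧ c ≤ ((m:Int) + 1))
    (fun c => V coins (m + 1 - c.toNat) + 1) pyINF hmem ⟨hc, by push_cast at hle ⊢; omega⟩

theorem V_attains_parent (coins : List Int) (n : Nat) (h : V coins (n+1) < pyINF) :
    ∃ c ∈ coins, 0 < c ∧ c ≤ ((n:Int) + 1) ∧ V coins (n+1) = V coins (n + 1 - c.toNat) + 1 := by
  rcases foldl_minif_attains coins (fun c => 0 < c ∧ c ≤ ((n:Int) + 1))
      (fun c => V coins (n + 1 - c.toNat) + 1) pyINF with hh | ⟨c, hmem, hg, hh⟩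
  · rw [V_succ] at h; omega
  · exact ⟨c, hmem, hg.1, hg.2, by rw [V_succ, hh]⟩

-- ---- the BFS state characterisation ----

-- the distance table after all levels ≤ k have been expanded
def g (coins : List Int) (k : Nat) (i : Nat) : Int :=
  if V coins i ≤ (k:Int) ∧ V coins i < pyINF then V coins i else pyINF

def row (coins : List Int) (M k : Nat) : List Int := (List.range (M+1)).map (g coins k)

-- the distance table in the middle of level k+1, N = nodes already reached this level
def distOf (coins : List Int) (M k : Nat) (N : List Int) : List Int :=
  (List.range (M+1)).map (fun i => if ((i:Nat):Int) ∈ N then (k:Int)+1 else g coins k i)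

-- soundness of the partial next-frontier N
def NOK (coins : List Int) (M k : Nat) (N : List Int) : Prop :=
  ∀ z ∈ N, ∃ n : Nat, z = (n:Int) ∧ n ≤ M ∧ V coins n = (k:Int)+1 ∧ (k:Int)+1 < pyINF

-- full characterisation of the frontier at level k
def FrOK (coins : List Int) (M k : Nat) (F : List Int) : Prop :=
  ∀ z, z ∈ F ↔ ∃ n : Nat, z = (n:Int) ∧ n ≤ M ∧ V coins n = (k:Int) ∧ (k:Int) < pyINF

theorem distOf_nil (coins : List Int) (M k : Nat) : distOf coins M k [] = row coins M k := by
  simp [distOf, row]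

theorem distOf_get (coins : List Int) (M k : Nat) (N : List Int) {y : Nat} (hy : y ≤ M) :
    PySem.List.pyGetD (distOf coins M k N) ((y:Nat):Int) 0
      = if ((y:Nat):Int) ∈ N then (k:Int)+1 else g coins k y := by
  rw [PySem.List.pyGetD_natCast, distOf, PySem.List.getD_map_range _ _ _ _ (by omega)]

theorem distOf_set (coins : List Int) (M k : Nat) (N : List Int) {y : Nat} (hy : y ≤ M) :
    PySem.List.pySetD (distOf coins M k N) ((y:Nat):Int) ((k:Int)+1)
      = distOf coins M k (N ++ [((y:Nat):Int)]) := by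
  rw [PySem.List.pySetD_natCast, distOf, set_map_range (by omega)]
  apply List.map_congr_left
  intro i hi
  rw [List.mem_range] at hi
  by_cases h1 : i = y
  · subst h1; simp
  · rw [if_neg h1]
    have hne : ¬ ((i:Nat):Int) ∈ [((y:Nat):Int)] := by
      simp only [List.mem_singleton]
      intro h
      exact h1 (by exact_mod_cast h)
    by_cases h2 : ((i:Nat):Int) ∈ N
    · rw [if_pos h2, if_pos (List.mem_append_left _ h2)]
    · rw [if_neg h2, if_neg (by
        intro h
        rcases List.mem_append.1 h with h | h
        · exact h2 h
        · exact hne h)]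

theorem natCast_add_toNat (n : Nat) {c : Int} (hc : 0 ≤ c) :
    (n:Int) + c = ((n + c.toNat : Nat) : Int) := by
  have := Int.toNat_of_nonneg hc
  push_cast
  omega

theorem inner_coins (coins : List Int) (M k : Nat) (hkI : (k:Int) < pyINF)
    {n : Nat} (_hn : n ≤ M) (hVn : V coins n = (k:Int)) :
    ∀ (l : List Int), (∀ c ∈ l, c ∈ coins ∧ 0 ≤ c) → ∀ (N : List Int), NOK coins M k N →
    ∃ N', l.foldl
        (fun q c =>
          let y := (n:Int) + c
          if y ≤ (M:Int) ∧ (k:Int)+1 < PySem.List.pyGetD q.1 y 0 then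
            (PySem.List.pySetD q.1 y ((k:Int)+1), q.2 ++ [y])
          else q)
        (distOf coins M k N, N)
      = (distOf coins M k N', N')
      ∧ NOK coins M k N'
      ∧ (∀ z ∈ N, z ∈ N')
      ∧ (∀ c ∈ l, (n:Int) + c ≤ (M:Int) → (k:Int)+1 < pyINF →
          V coins (n + c.toNat) = (k:Int)+1 → (n:Int) + c ∈ N') := by
  intro l
  induction l with
  | nil =>
    intro _ N hN
    exact ⟨N, rfl, hN, fun z hz => hz, by simp⟩
  | cons c t ih =>
    intro hl N hN
    have hcmem : c ∈ coins := (hl c List.mem_cons_self).1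
    have hc0 : 0 ≤ c := (hl c List.mem_cons_self).2
    have ht : ∀ c' ∈ t, c' ∈ coins ∧ 0 ≤ c' := fun c' h => hl c' (List.mem_cons_of_mem _ h)
    have hy : (n:Int) + c = ((n + c.toNat : Nat) : Int) := natCast_add_toNat n hc0
    simp only [List.foldl_cons]
    by_cases hG : (n:Int) + c ≤ (M:Int) ∧ (k:Int)+1 < PySem.List.pyGetD (distOf coins M k N) ((n:Int) + c) 0
    · -- the relaxation fires: y is a new node of value k+1
      have hyM : n + c.toNat ≤ M := by
        have := hG.1; rw [hy] at this; exact_mod_cast this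
      have hget : PySem.List.pyGetD (distOf coins M k N) ((n:Int) + c) 0
          = if ((n + c.toNat : Nat):Int) ∈ N then (k:Int)+1 else g coins k (n + c.toNat) := by
        rw [hy, distOf_get coins M k N hyM]
      have hnotN : ¬ ((n + c.toNat : Nat):Int) ∈ N := by
        intro hmem
        have := hG.2
        rw [hget, if_pos hmem] at this
        omega
      have hgINF : g coins k (n + c.toNat) = pyINF ∧ (k:Int)+1 < pyINF := by
        have h2 := hG.2
        rw [hget, if_neg hnotN] at h2
        unfold g at h2 ⊢
        by_cases hcond : V coins (n + c.toNat) ≤ (k:Int) ∧ V coins (n + c.toNat) < pyINF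
        · rw [if_pos hcond] at h2; omega
        · rw [if_neg hcond] at h2; rw [if_neg hcond]; exact ⟨rfl, h2⟩
      have hcpos : 0 < c := by
        rcases lt_or_eq_of_le hc0 with h | h
        · exact h
        · exfalso
          have hc' : c = 0 := h.symm
          subst hc'
          have : n + (0:Int).toNat = n := by simp
          rw [this] at hgINF
          unfold g at hgINF
          rw [if_pos ⟨by omega, by omega⟩] at hgINF
          have := hgINF.1
          omega
      have hVy : V coins (n + c.toNat) = (k:Int)+1 := by
        have hle : V coins (n + c.toNat) ≤ (k:Int)+1 := by
          have htr := V_triangle coins hcmem hcpos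
            (n := n + c.toNat) (by have := Int.toNat_of_nonneg hc0; push_cast; omega)
          have hsub : n + c.toNat - c.toNat = n := by omega
          rw [hsub] at htr
          omega
        have hg' := hgINF.1
        have hINF2 := hgINF.2
        unfold g at hg'
        by_cases h : V coins (n + c.toNat) ≤ (k:Int)
        · rw [if_pos ⟨h, by omega⟩] at hg'
          omega
        · omega
      rw [if_pos hG]
      have hwrite : PySem.List.pySetD (distOf coins M k N) ((n:Int) + c) ((k:Int)+1)
          = distOf coins M k (N ++ [(n:Int) + c]) := by
        rw [hy, distOf_set coins M k N hyM]
      have hN1 : NOK coins M k (N ++ [(n:Int) + c]) := by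
        intro z hz
        rcases List.mem_append.1 hz with h | h
        · exact hN z h
        · rw [List.mem_singleton] at h
          subst h
          exact ⟨n + c.toNat, hy, hyM, hVy, hgINF.2⟩
      obtain ⟨N', heq, hNok, hmono, hcomp⟩ := ih ht (N ++ [(n:Int) + c]) hN1
      refine ⟨N', by rw [← heq, hwrite], hNok, ?_, ?_⟩
      · exact fun z hz => hmono z (List.mem_append_left _ hz)
      · intro c' hc' _ _ _
        rcases List.mem_cons.1 hc' with rfl | hmem
        · exact hmono _ (List.mem_append_right _ (List.mem_singleton.2 rfl))
        · rename_i h1 h2 h3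
          exact hcomp c' hmem h1 h2 h3
    · rw [if_neg hG]
      obtain ⟨N', heq, hNok, hmono, hcomp⟩ := ih ht N hN
      refine ⟨N', heq, hNok, hmono, ?_⟩
      intro c' hc' h1 h2 h3
      rcases List.mem_cons.1 hc' with rfl | hmem
      · -- the guard would have fired unless y was already reached
        have hyM : n + c'.toNat ≤ M := by
          rw [natCast_add_toNat n hc0] at h1; exact_mod_cast h1
        have hget : PySem.List.pyGetD (distOf coins M k N) ((n:Int) + c') 0
            = if ((n + c'.toNat : Nat):Int) ∈ N then (k:Int)+1 else g coins k (n + c'.toNat) := by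
          rw [natCast_add_toNat n hc0, distOf_get coins M k N hyM]
        by_cases hmemN : ((n + c'.toNat : Nat):Int) ∈ N
        · rw [natCast_add_toNat n hc0]
          exact hmono _ hmemN
        · exfalso
          apply hG
          refine ⟨h1, ?_⟩
          rw [hget, if_neg hmemN]
          unfold g
          rw [if_neg (by
            intro hcond
            omega)]
          exact h2
      · exact hcomp c' hmem h1 h2 h3

theorem frontier_fold (coins : List Int) (hc : ∀ c ∈ coins, 0 ≤ c) (M k : Nat)
    (hkI : (k:Int) < pyINF) :
    ∀ (F : List Int), (∀ x ∈ F, ∃ n : Nat, x = (n:Int) ∧ n ≤ M ∧ V coins n = (k:Int)) →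
    ∀ (N : List Int), NOK coins M k N →
    ∃ N', F.foldl
        (fun p x =>
          coins.foldl
            (fun q c =>
              let y := x + c
              if y ≤ (M:Int) ∧ (k:Int)+1 < PySem.List.pyGetD q.1 y 0 then
                (PySem.List.pySetD q.1 y ((k:Int)+1), q.2 ++ [y])
              else q)
            p)
        (distOf coins M k N, N)
      = (distOf coins M k N', N')
      ∧ NOK coins M k N'
      ∧ (∀ z ∈ N, z ∈ N')
      ∧ (∀ m : Nat, (m:Int) ∈ F → ∀ c ∈ coins, (m:Int) + c ≤ (M:Int) → (k:Int)+1 < pyINF →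
          V coins (m + c.toNat) = (k:Int)+1 → (m:Int) + c ∈ N') := by
  intro F
  induction F with
  | nil =>
    intro _ N hN
    exact ⟨N, rfl, hN, fun z hz => hz, by simp⟩
  | cons x F' ih =>
    intro hF N hN
    obtain ⟨n, rfl, hnM, hVn⟩ := hF x List.mem_cons_self
    simp only [List.foldl_cons]
    obtain ⟨N1, heq1, hNok1, hmono1, hcomp1⟩ :=
      inner_coins coins M k hkI hnM hVn coins (fun c h => ⟨h, hc c h⟩) N hN
    rw [heq1]
    obtain ⟨N', heq2, hNok2, hmono2, hcomp2⟩ :=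
      ih (fun x h => hF x (List.mem_cons_of_mem _ h)) N1 hNok1
    refine ⟨N', heq2, hNok2, fun z hz => hmono2 z (hmono1 z hz), ?_⟩
    intro m hm c hcm h1 h2 h3
    rcases List.mem_cons.1 hm with hx | hmem
    · have hmn : m = n := by exact_mod_cast hx
      subst hmn
      exact hmono2 _ (hcomp1 c hcm h1 h2 h3)
    · exact hcomp2 m hmem c hcm h1 h2 h3

theorem g_stable (coins : List Int) {k : Nat} (hk : pyINF ≤ (k:Int) + 1) (i : Nat) :
    g coins k i = g coins (k+1) i := by
  unfold g
  have h1 := V_le_INF coins i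
  by_cases h : V coins i < pyINF
  · rw [if_pos ⟨by omega, h⟩, if_pos ⟨by push_cast; omega, h⟩]
  · rw [if_neg (by omega), if_neg (by omega)]

theorem level_step (coins : List Int) (hc : ∀ c ∈ coins, 0 ≤ c) (M k : Nat)
    (F : List Int) (hF : FrOK coins M k F) :
    ∃ F', bfsLevel (M:Int) coins (row coins M k, F) ((k:Int)+1) = (row coins M (k+1), F')
      ∧ FrOK coins M (k+1) F' := by
  by_cases hkI : (k:Int) < pyINF
  · obtain ⟨N', heq, hNok, _, hcomp⟩ :=
      frontier_fold coins hc M k hkI F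
        (fun x hx => by
          obtain ⟨n, h1, h2, h3, _⟩ := (hF x).1 hx
          exact ⟨n, h1, h2, h3⟩)
        [] (by intro z hz; cases hz)
    have hmemN' : ∀ z, z ∈ N' ↔ ∃ n : Nat, z = (n:Int) ∧ n ≤ M ∧ V coins n = (k:Int)+1 ∧ (k:Int)+1 < pyINF := by
      intro z
      constructor
      · exact hNok z
      · rintro ⟨n, rfl, hnM, hVn, hINF⟩
        -- n has value k+1: it has a parent on the frontier, so it was reached
        have hn1 : 1 ≤ n := by
          by_contra h
          have : n = 0 := by omega
          subst this
          rw [V_zero] at hVn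
          omega
        obtain ⟨m, rfl⟩ : ∃ m, n = m + 1 := ⟨n - 1, by omega⟩
        obtain ⟨c, hcmem, hcpos, hcle, hVeq⟩ := V_attains_parent coins m (by omega)
        have hp : V coins (m + 1 - c.toNat) = (k:Int) := by omega
        have hpF : ((m + 1 - c.toNat : Nat):Int) ∈ F :=
          (hF _).2 ⟨m + 1 - c.toNat, rfl, by omega, hp, by omega⟩
        have hsum : ((m + 1 - c.toNat : Nat):Int) + c = ((m+1 : Nat):Int) := by
          have := Int.toNat_of_nonneg hcpos.le
          push_cast at hcle ⊢
          omega
        have := hcomp (m + 1 - c.toNat) hpF c hcmem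
          (by rw [hsum]; exact_mod_cast hnM) hINF
          (by
            have : m + 1 - c.toNat + c.toNat = m + 1 := by
              have h1 := Int.toNat_of_nonneg hcpos.le
              have h2 : (c.toNat : Int) ≤ (m:Int) + 1 := by rw [h1]; exact_mod_cast hcle
              omega
            rw [this]
            exact hVn)
        rw [hsum] at this
        exact this
    have hdist : distOf coins M k N' = row coins M (k+1) := by
      unfold distOf row
      apply List.map_congr_left
      intro i hi
      rw [List.mem_range] at hi
      by_cases hiN : ((i:Nat):Int) ∈ N'
      · obtain ⟨n, hcast, _, hVn, hINF⟩ := (hmemN' _).1 hiN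
        have hni : n = i := by exact_mod_cast hcast.symm
        subst hni
        rw [if_pos hiN]
        unfold g
        rw [hVn, if_pos ⟨by push_cast; omega, by omega⟩]
      · rw [if_neg hiN]
        unfold g
        by_cases h1 : V coins i ≤ (k:Int) ∧ V coins i < pyINF
        · rw [if_pos h1, if_pos ⟨by push_cast; omega, h1.2⟩]
        · by_cases h2 : V coins i ≤ (k:Int)+1 ∧ V coins i < pyINF
          · exfalso
            have hVi : V coins i = (k:Int)+1 := by
              by_cases hle2 : V coins i ≤ (k:Int)
              · exact absurd ⟨hle2, h2.2⟩ h1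
              · omega
            apply hiN
            apply (hmemN' ((i:Nat):Int)).2
            exact ⟨i, rfl, by omega, hVi, by omega⟩
          · rw [if_neg h1, if_neg (by push_cast at h2 ⊢; omega)]
    refine ⟨N', ?_, ?_⟩
    · unfold bfsLevel
      simp only
      rw [← distOf_nil coins M k]
      rw [heq, hdist]
    · intro z
      rw [hmemN']
      constructor
      · rintro ⟨n, h1, h2, h3, h4⟩; exact ⟨n, h1, h2, by push_cast; omega, by push_cast; omega⟩
      · rintro ⟨n, h1, h2, h3, h4⟩; exact ⟨n, h1, h2, by push_cast at h3; omega, by push_cast at h4; omega⟩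
  · -- k ≥ INF: the frontier is empty and nothing changes
    have hFnil : F = [] := by
      cases hFe : F with
      | nil => rfl
      | cons x F'' =>
        exfalso
        have := (hF x).1 (by rw [hFe]; exact List.mem_cons_self)
        obtain ⟨n, _, _, _, h4⟩ := this
        omega
    subst hFnil
    refine ⟨[], ?_, ?_⟩
    · unfold bfsLevel
      simp only [List.foldl_nil]
      rw [row, row]
      have : (List.range (M+1)).map (g coins k) = (List.range (M+1)).map (g coins (k+1)) := by
        apply List.map_congr_left
        intro i _
        exact g_stable coins (by omega) i
      rw [this]
    · intro z
      simp only [List.not_mem_nil, false_iff]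
      rintro ⟨n, _, _, _, h4⟩
      have h5 := V_le_INF coins n
      omega

theorem outer_fold (coins : List Int) (hc : ∀ c ∈ coins, 0 ≤ c) (M : Nat) :
    ∀ (b a : Nat), a + b = M → ∀ F, FrOK coins M a F →
    ((PySem.List.pyRange ((a:Int)+1) ((M:Int)+1) 1).foldl
        (bfsLevel (M:Int) coins) (row coins M a, F)).1 = row coins M M := by
  intro b
  induction b with
  | zero =>
    intro a ha F _
    have haM : a = M := by omega
    subst haM
    rw [PySem.List.pyRange_one_eq_nil le_rfl]
    rfl
  | succ b ih =>
    intro a ha F hF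
    have hlt : (a:Int)+1 < (M:Int)+1 := by omega
    rw [PySem.List.pyRange_one_cons hlt, List.foldl_cons]
    obtain ⟨F', heq, hF'⟩ := level_step coins hc M a F hF
    rw [heq]
    have hcast : (a:Int) + 1 + 1 = ((a+1 : Nat):Int) + 1 := by push_cast; ring
    rw [hcast]
    exact ih (a+1) (by omega) F' hF'

theorem dist0_eq_row (coins : List Int) (M : Nat) :
    (List.replicate (M+1) pyINF).set 0 0 = row coins M 0 := by
  apply List.ext_getElem
  · simp [row]
  · intro i h1 h2
    simp only [List.length_set, List.length_replicate] at h1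
    rw [List.getElem_set]
    simp only [row, List.getElem_map, List.getElem_range]
    by_cases hi : 0 = i
    · subst hi
      norm_num [g, V_zero, pyINF]
    · rw [if_neg hi, List.getElem_replicate]
      unfold g
      obtain ⟨m, rfl⟩ : ∃ m, i = m + 1 := ⟨i - 1, by omega⟩
      rw [if_neg (by
        intro h
        have := V_ge_one coins m
        omega)]

theorem row_last (coins : List Int) (M : Nat) :
    row coins M M = (List.range (M+1)).map (fun i => V coins i) := by
  apply List.map_congr_left
  intro i hi
  rw [List.mem_range] at hi
  unfold g
  by_cases h : V coins i < pyINF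
  · rw [if_pos ⟨by
      have := V_le_self coins i h
      push_cast at this ⊢
      omega, h⟩]
  · rw [if_neg (by omega)]
    have := V_le_INF coins i
    omega

theorem FrOK_init (coins : List Int) (M : Nat) : FrOK coins M 0 [0] := by
  intro z
  simp only [List.mem_singleton]
  constructor
  · rintro rfl
    exact ⟨0, rfl, by omega, V_zero coins, by norm_num [pyINF]⟩
  · rintro ⟨n, rfl, _, hV, _⟩
    have : n = 0 := by
      by_contra h
      obtain ⟨m, rfl⟩ : ∃ m, n = m + 1 := ⟨n - 1, by omega⟩
      have := V_ge_one coins m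
      omega
    subst this
    rfl

theorem portB_eq (max_amount : Int) (coins_asc : List Int)
    (hm : 0 ≤ max_amount) (hc : ∀ c ∈ coins_asc, 0 ≤ c) :
    dp_min_coins_up_to_alt max_amount coins_asc =
      (List.range (max_amount.toNat + 1)).map (fun i => V coins_asc i) := by
  obtain ⟨M, hM⟩ : ∃ M : Nat, max_amount = (M:Int) := ⟨max_amount.toNat, (Int.toNat_of_nonneg hm).symm⟩
  subst hM
  rw [Int.toNat_natCast]
  unfold dp_min_coins_up_to_alt
  have h1 : ((M:Int) + 1).toNat = M + 1 := by omega
  have h2 : PySem.List.pySetD (List.replicate (M+1) pyINF) 0 0 = row coins_asc M 0 := by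
    rw [PySem.List.pySetD_of_nonneg _ _ le_rfl, Int.toNat_zero, dist0_eq_row]
  simp only [h1, h2]
  have h4 := outer_fold coins_asc hc M M 0 (by omega) [0] (FrOK_init coins_asc M)
  simp only [Nat.cast_zero, zero_add] at h4
  rw [h4, row_last]

theorem both_trivial (coins_asc : List Int) :
    dp_min_coins_up_to 0 coins_asc = dp_min_coins_up_to_alt 0 coins_asc := by
  unfold dp_min_coins_up_to dp_min_coins_up_to_alt
  rw [PySem.List.pyRange_one_eq_nil (by norm_num)]
  rfl

-- ===== VERDICT (by name: the statement is the Claim_ definition above) =====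
theorem dp_min_coins_up_to_spec : Claim_equal_dp_min_coins_up_to := by
  intro max_amount coins_asc _ hpre
  unfold Spec_dp_min_coins_up_to
  rcases hpre.2 with h0 | hcoins
  · subst h0
    exact both_trivial coins_asc
  · rw [portA_eq max_amount coins_asc hpre.1 hcoins, portB_eq max_amount coins_asc hpre.1 hcoins]
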